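-- pv_equiv track=rewrite | github.com/organicmaps/organicmaps | tools/python/clean_strings_txt.py | generate_auto_tags
-- ===== SOURCE A (Python) =====
-- from collections import defaultdict
--
-- def generate_auto_tags(ios, android, core):
--     new_tags = defaultdict(set)
--     for i in ios:
--         new_tags[i].add("ios")
--
--     for a in android:
--         new_tags[a].add("android")
--
--     for c in core:
--         new_tags[c].add("ios")
--         new_tags[c].add("android")
--
--     return new_tags
-- ===== SOURCE B (Python) =====
-- from collections import defaultdict
--
--
-- def generate_auto_tags(ios, android, core):
--     # Single pass over the distinct keys (first-occurrence order), deciding each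
--     # key's label set by membership tests instead of mutating a dict in three loops.
--     ios_s, android_s, core_s = set(ios), set(android), set(core)
--     out = defaultdict(set)
--     for k in dict.fromkeys(ios + android + core):
--         tags = set()
--         if k in ios_s:
--             tags.add("ios")
--         if k in android_s:
--             tags.add("android")
--         if k in core_s:
--             tags.update(("ios", "android"))
--         out[k] = tags
--     return out
-- ===== Notes on version B (the rewrite author's own statement) =====
-- stated objective: alternative
-- what changed: A mutates a defaultdict in three separate loops over ios/android/core; B precomputes the three membership sets, takes the distinct keys of ios+android+core in first-occurrence order, and builds each key's label set in one pass by membership tests.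
import Mathlib
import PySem

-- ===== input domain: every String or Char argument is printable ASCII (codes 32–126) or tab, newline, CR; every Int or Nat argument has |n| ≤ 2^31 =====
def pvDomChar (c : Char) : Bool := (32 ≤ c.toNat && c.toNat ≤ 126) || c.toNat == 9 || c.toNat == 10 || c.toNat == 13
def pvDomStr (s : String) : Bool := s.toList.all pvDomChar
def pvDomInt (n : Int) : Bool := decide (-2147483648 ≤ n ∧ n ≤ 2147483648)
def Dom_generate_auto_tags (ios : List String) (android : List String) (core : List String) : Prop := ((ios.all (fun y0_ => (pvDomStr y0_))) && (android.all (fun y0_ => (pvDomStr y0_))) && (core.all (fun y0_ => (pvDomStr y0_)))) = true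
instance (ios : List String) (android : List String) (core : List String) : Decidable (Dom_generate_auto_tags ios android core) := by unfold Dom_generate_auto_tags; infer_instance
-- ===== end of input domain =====

-- B replaces A's three dict-mutating loops by one pass over the distinct keys with membership tests (alternative decomposition, same cost).


-- ===== PORT A =====
-- sets (values of the defaultdict) are PySem.Set String; the returned dict is the items list
def generate_auto_tags (ios : List String) (android : List String) (core : List String) : List (String × List String) :=
  let d0 : PySem.Dict String (PySem.Set String) := PySem.Dict.empty
  let d1 := ios.foldl (fun d i => d.modify i PySem.Set.empty (fun s => s.add "ios")) d0
  let d2 := android.foldl (fun d a => d.modify a PySem.Set.empty (fun s => s.add "android")) d1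
  let d3 := core.foldl (fun d c => d.modify c PySem.Set.empty (fun s => (s.add "ios").add "android")) d2
  d3.items

-- ===== PORT B =====
-- the per-key label set of Source B's loop body (membership tests against the three sets)
def pvTagsFor (iosS androidS coreS : PySem.Set String) (k : String) : PySem.Set String :=
  let t0 : PySem.Set String := PySem.Set.empty
  let t1 := if iosS.contains k then t0.add "ios" else t0
  let t2 := if androidS.contains k then t1.add "android" else t1
  if coreS.contains k then PySem.Set.update t2 ["ios", "android"] else t2

def generate_auto_tags_alt (ios : List String) (android : List String) (core : List String) : List (String × List String) :=
  let iosS := PySem.Set.ofList ios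
  let androidS := PySem.Set.ofList android
  let coreS := PySem.Set.ofList core
  let d := (PySem.List.dedup (ios ++ android ++ core)).foldl
      (fun d k => d.insert k (pvTagsFor iosS androidS coreS k))
      (PySem.Dict.empty : PySem.Dict String (PySem.Set String))
  d.items

-- ===== PRECONDITION & SPEC =====
def Spec_generate_auto_tags (ios : List String) (android : List String) (core : List String) (out : List (String × List String)) : Prop := out = generate_auto_tags_alt ios android core
instance (ios : List String) (android : List String) (core : List String) (out : List (String × List String)) : Decidable (Spec_generate_auto_tags ios android core out) := by unfold Spec_generate_auto_tags; infer_instance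

-- ===== CLAIM (what is proved, stated in full; the proofs are below) =====
def Claim_equal_generate_auto_tags : Prop := ∀ (ios : List String) (android : List String) (core : List String), Dom_generate_auto_tags ios android core → Spec_generate_auto_tags ios android core (generate_auto_tags ios android core)

-- ===== LEMMAS AND PROOFS =====

lemma set_add_of_mem {α : Type} [BEq α] [LawfulBEq α] (s : PySem.Set α) (x : α) (h : x ∈ s) :
    s.add x = s := by
  simp [PySem.Set.add, PySem.Set.contains, h]

-- a modify-loop with an idempotent body: the final value at k only depends on whether k occurs
lemma getD_foldl_modify_idem {κ ν : Type} [BEq κ] [LawfulBEq κ] [DecidableEq κ]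
    (f : ν → ν) (hf : ∀ v, f (f v) = f v) (l : List κ) (d : PySem.Dict κ ν) (d0 : ν) (k : κ) :
    (l.foldl (fun d x => d.modify x d0 f) d).getD k d0 =
      if k ∈ l then f (d.getD k d0) else d.getD k d0 := by
  induction l generalizing d with
  | nil => simp
  | cons x l ih =>
    simp only [List.foldl_cons, ih, PySem.Dict.getD_modify, List.mem_cons]
    by_cases hkx : k = x <;> by_cases hkl : k ∈ l <;> simp [hkx, hkl, hf]

lemma add_ios_idem (v : PySem.Set String) :
    ((v.add "ios").add "ios" : PySem.Set String) = v.add "ios" :=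
  set_add_of_mem _ _ ((PySem.Set.mem_add v "ios" "ios").mpr (Or.inr rfl))

lemma add_android_idem (v : PySem.Set String) :
    ((v.add "android").add "android" : PySem.Set String) = v.add "android" :=
  set_add_of_mem _ _ ((PySem.Set.mem_add v "android" "android").mpr (Or.inr rfl))

lemma add_core_idem (v : PySem.Set String) :
    ((((((v.add "ios").add "android").add "ios").add "android") : PySem.Set String))
      = (v.add "ios").add "android" := by
  have h1 : (((v.add "ios").add "android").add "ios" : PySem.Set String)
      = (v.add "ios").add "android" :=
    set_add_of_mem _ _ ((PySem.Set.mem_add _ "android" "ios").mpr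
      (Or.inl ((PySem.Set.mem_add v "ios" "ios").mpr (Or.inr rfl))))
  rw [h1, add_android_idem]

theorem generate_auto_tags_eq_alt (ios android core : List String) :
    generate_auto_tags ios android core = generate_auto_tags_alt ios android core := by
  unfold generate_auto_tags generate_auto_tags_alt
  -- name A's final dict
  set d3 := core.foldl (fun d c => d.modify c PySem.Set.empty (fun s => (s.add "ios").add "android"))
    (android.foldl (fun d a => d.modify a PySem.Set.empty (fun s => s.add "android"))
      (ios.foldl (fun d i => d.modify i PySem.Set.empty (fun s => s.add "ios"))
        (PySem.Dict.empty : PySem.Dict String (PySem.Set String)))) with hd3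
  have hkeys : d3.keys = PySem.Set.ofList (ios ++ android ++ core) := by
    rw [hd3]
    rw [PySem.Dict.keys_foldl_modify core PySem.Set.empty (fun _ _ s => (s.add "ios").add "android")]
    rw [PySem.Dict.keys_foldl_modify android PySem.Set.empty (fun _ _ s => s.add "android")]
    rw [PySem.Dict.keys_foldl_modify ios PySem.Set.empty (fun _ _ s => s.add "ios")]
    simp [PySem.Set.ofList_eq_foldl, PySem.Set.update, List.foldl_append, PySem.Dict.keys,
      PySem.Dict.empty]
  have hnd : d3.keys.Nodup := by rw [hkeys]; exact PySem.Set.nodup_ofList _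
  -- A's side: items as a map over the keys
  rw [PySem.Dict.items_eq_map_keys d3 hnd PySem.Set.empty, hkeys]
  -- B's side: a fold of fresh inserts over distinct keys appends its pairs
  rw [PySem.List.dedup_eq_ofList]
  rw [PySem.Dict.items_foldl_insert_fresh (PySem.Set.ofList (ios ++ android ++ core))
      (fun k => k) (fun k => pvTagsFor (PySem.Set.ofList ios) (PySem.Set.ofList android)
        (PySem.Set.ofList core) k) PySem.Dict.empty
      (fun a _ => rfl) (by simp [PySem.Set.nodup_ofList])]
  simp only [PySem.Dict.empty, List.nil_append]
  -- pointwise equality of the two per-key values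
  refine List.map_congr_left (fun k _ => ?_)
  have hvals : d3.getD k PySem.Set.empty = pvTagsFor (PySem.Set.ofList ios)
      (PySem.Set.ofList android) (PySem.Set.ofList core) k := by
    rw [hd3]
    rw [getD_foldl_modify_idem _ add_core_idem]
    rw [getD_foldl_modify_idem _ add_android_idem]
    rw [getD_foldl_modify_idem _ add_ios_idem]
    have hempty : (PySem.Dict.empty : PySem.Dict String (PySem.Set String)).getD k PySem.Set.empty
        = PySem.Set.empty := rfl
    rw [hempty]
    unfold pvTagsFor
    have hc : ∀ xs : List String, (PySem.Set.ofList xs).contains k = decide (k ∈ xs) := by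
      intro xs
      simp [PySem.Set.contains, PySem.Set.mem_ofList]
    simp only [hc, PySem.Set.update, List.foldl_cons, List.foldl_nil, decide_eq_true_eq]
  rw [hvals]

-- ===== VERDICT (by name: the statement is the Claim_ definition above) =====
theorem generate_auto_tags_spec : Claim_equal_generate_auto_tags := by
  intro ios android core _
  exact generate_auto_tags_eq_alt ios android core
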